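-- pv_equiv track=rewrite | github.com/dongchen-coder/locapo | npc_version/mr_curve_scripts/ul_mr.py | get_log_iters
-- ===== SOURCE A (Python) =====
-- def get_log_iters(maximum):
-- 	num=1
-- 	pwr=0
-- 	bounds=[]
-- 	while(True):
-- 		if(num*10**pwr > maximum):
-- 			break
-- 		bounds.append(num * (10**pwr))
-- 		num+=1
-- 		if(num==10):
-- 			num=1
-- 			pwr += 1
-- 	return bounds
-- ===== SOURCE B (Python) =====
-- def get_log_iters(maximum):
--     # closed-form: count how many bounds fit, then build each by its index
--     if maximum < 1:
--         return []
--     p = 0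
--     while 10 ** (p + 1) <= maximum:
--         p += 1
--     count = 9 * p + maximum // 10 ** p
--     return [(i % 9 + 1) * 10 ** (i // 9) for i in range(count)]
-- ===== Notes on version B (the rewrite author's own statement) =====
-- stated objective: alternative
-- what changed: Instead of enumerating candidates one by one and testing each against maximum, B computes the length of the answer in closed form (nine per full decade plus the leading digit of maximum) and builds each element directly from its index via the formula (i%9+1)*pow(ten, i//9) over range(count).
import Mathlib
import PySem

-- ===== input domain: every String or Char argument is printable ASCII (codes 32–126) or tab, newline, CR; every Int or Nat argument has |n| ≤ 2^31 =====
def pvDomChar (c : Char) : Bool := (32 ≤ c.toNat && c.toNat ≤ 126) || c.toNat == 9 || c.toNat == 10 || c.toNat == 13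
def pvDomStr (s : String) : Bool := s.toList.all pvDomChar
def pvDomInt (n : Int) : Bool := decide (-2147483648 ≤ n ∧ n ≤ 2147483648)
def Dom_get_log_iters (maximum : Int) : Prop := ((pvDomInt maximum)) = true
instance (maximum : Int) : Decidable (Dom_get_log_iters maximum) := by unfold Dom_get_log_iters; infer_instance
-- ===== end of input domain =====

-- B replaces A's element-by-element enumeration (each candidate tested against maximum)
-- by a closed-form count 9*floor(log10 maximum) + leading digit, building the list directly
-- by the index formula (i%9+1)*10^(i//9) over range(count) (objective: alternative).

-- ===== PORT A =====
-- A's while(True) loop, state (num, pwr, bounds); the Nat fuel is only a totality guard: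
-- the loop appends distinct positive integers ≤ maximum, so it runs at most maximum.toNat + 1
-- iterations and fuel maximum.toNat is never exhausted (the equivalence lemmas prove this).
def loopA (maximum : Int) : Nat → Int → Nat → List Int → List Int
  | 0, _, _, bounds => bounds
  | f + 1, num, pwr, bounds =>
    if num * 10 ^ pwr > maximum then bounds
    else
      let bounds' := bounds ++ [num * 10 ^ pwr]
      if num + 1 = 10 then loopA maximum f 1 (pwr + 1) bounds'
      else loopA maximum f (num + 1) pwr bounds'

def get_log_iters (maximum : Int) : List Int :=
  loopA maximum maximum.toNat 1 0 []

-- ===== PORT B =====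
-- B's `while 10**(p+1) <= maximum: p += 1`; same fuel-as-totality-guard remark.
def leadPow (maximum : Int) : Nat → Nat → Nat
  | 0, p => p
  | f + 1, p => if (10 : Int) ^ (p + 1) ≤ maximum then leadPow maximum f (p + 1) else p

-- B: early return [] for maximum < 1, then count = 9*p + maximum // 10**p and the
-- comprehension [(i%9+1)*10**(i//9) for i in range(count)].  The `.toNat` on the
-- exponent is exact: every i produced by range(count) is nonnegative.
def get_log_iters_alt (maximum : Int) : List Int :=
  if maximum < 1 then []
  else
    let p := leadPow maximum maximum.toNat 0
    let count : Int := 9 * p + PySem.Int.floordiv maximum (10 ^ p)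
    (PySem.List.pyRange 0 count 1).map
      (fun i => (PySem.Int.mod i 9 + 1) * 10 ^ (PySem.Int.floordiv i 9).toNat)

-- ===== PRECONDITION & SPEC =====
def Spec_get_log_iters (maximum : Int) (out : List Int) : Prop := out = get_log_iters_alt maximum
instance (maximum : Int) (out : List Int) : Decidable (Spec_get_log_iters maximum out) := by unfold Spec_get_log_iters; infer_instance

-- ===== CLAIM (what is proved, stated in full; the proofs are below) =====
def Claim_equal_get_log_iters : Prop := ∀ (maximum : Int), Dom_get_log_iters maximum → Spec_get_log_iters maximum (get_log_iters maximum)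

-- ===== LEMMAS AND PROOFS =====

-- the decade segment starting at digit `num` within power `pwr`
def seg (m num : Int) (pwr : Nat) : List Int :=
  ((PySem.List.pyRange num 10 1).map (fun d => d * 10 ^ pwr)).filter (fun v => v ≤ m)

-- the full output from power `pwr` on, indexed by fuel
def chain (m : Int) : Nat → Nat → List Int
  | 0, _ => []
  | f + 1, pwr => seg m 1 pwr ++ chain m f (pwr + 1)

lemma seg_nil (m num : Int) (pwr : Nat) (h1 : 1 ≤ num) (hbr : num * 10 ^ pwr > m) :
    seg m num pwr = [] := by
  apply List.filter_eq_nil_iff.2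
  intro v hv
  simp only [List.mem_map] at hv
  obtain ⟨d, hd, rfl⟩ := hv
  rw [PySem.List.mem_pyRange_one] at hd
  have hp : (0:Int) < 10 ^ pwr := by positivity
  have : num * 10 ^ pwr ≤ d * 10 ^ pwr :=
    mul_le_mul_of_nonneg_right hd.1 (le_of_lt hp)
  simp only [decide_eq_true_eq]
  omega

lemma seg_cons (m num : Int) (pwr : Nat) (h1 : 1 ≤ num) (h9 : num ≤ 9) (hle : num * 10 ^ pwr ≤ m) :
    seg m num pwr = num * 10 ^ pwr :: seg m (num + 1) pwr := by
  unfold seg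
  rw [PySem.List.pyRange_one_cons (by omega)]
  simp [hle]

lemma chain_nil (m : Int) : ∀ (f pwr : Nat), 10 ^ pwr > m → chain m f pwr = [] := by
  intro f
  induction f with
  | zero => intro pwr _; rfl
  | succ f ih =>
    intro pwr h
    have hp : (0:Int) < 10 ^ pwr := by positivity
    have h10 : (10:Int) ^ (pwr + 1) = 10 * 10 ^ pwr := by ring
    show seg m 1 pwr ++ chain m f (pwr + 1) = []
    rw [seg_nil m 1 pwr le_rfl (by omega), ih (pwr + 1) (by omega)]
    rfl

lemma chain_pad (m : Int) : ∀ (f pwr : Nat), (m + 1 - 10 ^ pwr).toNat ≤ f →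
    chain m (f + 1) pwr = chain m f pwr := by
  intro f
  induction f with
  | zero =>
    intro pwr hk
    have hp : (0:Int) < 10 ^ pwr := by positivity
    have hbr : (10:Int) ^ pwr > m := by omega
    exact chain_nil m 1 pwr hbr
  | succ f ih =>
    intro pwr hk
    have hp : (0:Int) < 10 ^ pwr := by positivity
    have h10 : (10:Int) ^ (pwr + 1) = 10 * 10 ^ pwr := by ring
    show seg m 1 pwr ++ chain m (f + 1) (pwr + 1) = seg m 1 pwr ++ chain m f (pwr + 1)
    rw [ih (pwr + 1) (by omega)]

-- A's loop from state (num, pwr) produces the rest of decade pwr and then all later decades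
lemma loopA_eq (m : Int) : ∀ (f : Nat) (num : Int) (pwr : Nat) (bounds : List Int),
    (m + 1 - num * 10 ^ pwr).toNat ≤ f → 1 ≤ num → num ≤ 9 →
    loopA m f num pwr bounds = bounds ++ seg m num pwr ++ chain m f (pwr + 1) := by
  intro f
  induction f with
  | zero =>
    intro num pwr bounds hk h1 h9
    have hp : (0:Int) < 10 ^ pwr := by positivity
    have hbr : num * 10 ^ pwr > m := by omega
    rw [loopA, seg_nil m num pwr h1 hbr, chain]
    simp
  | succ f ih =>
    intro num pwr bounds hk h1 h9
    have hp : (0:Int) < 10 ^ pwr := by positivity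
    have h10 : (10:Int) ^ (pwr + 1) = 10 * 10 ^ pwr := by ring
    have hnum : num * 10 ^ pwr ≤ 9 * 10 ^ pwr :=
      mul_le_mul_of_nonneg_right h9 (le_of_lt hp)
    rw [loopA]
    by_cases hbr : num * 10 ^ pwr > m
    · rw [if_pos hbr, seg_nil m num pwr h1 hbr, chain_nil m (f + 1) (pwr + 1) (by omega)]
      simp
    · rw [if_neg hbr]
      push_neg at hbr
      by_cases h9' : num + 1 = 10
      · have : num = 9 := by omega
        subst this
        rw [if_pos h9']
        rw [ih 1 (pwr + 1) _ (by omega) le_rfl (by norm_num)]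
        rw [seg_cons m 9 pwr (by norm_num) le_rfl hbr]
        have hseg10 : seg m (9 + 1) pwr = [] := by
          unfold seg
          rw [PySem.List.pyRange_one_eq_nil (by norm_num)]
          rfl
        rw [hseg10]
        show _ = bounds ++ (9 * 10 ^ pwr :: []) ++ (seg m 1 (pwr + 1) ++ chain m f (pwr + 1 + 1))
        simp [List.append_assoc]
      · rw [if_neg h9']
        have hstep : (num + 1) * 10 ^ pwr = num * 10 ^ pwr + 10 ^ pwr := by ring
        rw [ih (num + 1) pwr _ (by omega) (by omega) (by omega)]
        rw [seg_cons m num pwr h1 h9 hbr]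
        rw [chain_pad m f (pwr + 1) (by omega)]
        simp [List.append_assoc]

-- leadPow computes floor(log10 m): 10^p ≤ m < 10^(p+1)
lemma leadPow_spec (m : Int) : ∀ (f p : Nat), (m - 10 ^ p).toNat ≤ f → (10:Int) ^ p ≤ m →
    (10:Int) ^ (leadPow m f p) ≤ m ∧ m < 10 ^ (leadPow m f p + 1) := by
  intro f
  induction f with
  | zero =>
    intro p hk hle
    have hp : (0:Int) < 10 ^ p := by positivity
    have h10 : (10:Int) ^ (p + 1) = 10 * 10 ^ p := by ring
    rw [leadPow]
    exact ⟨hle, by omega⟩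
  | succ f ih =>
    intro p hk hle
    have hp : (0:Int) < 10 ^ p := by positivity
    have h10 : (10:Int) ^ (p + 1) = 10 * 10 ^ p := by ring
    rw [leadPow]
    by_cases h : (10:Int) ^ (p + 1) ≤ m
    · rw [if_pos h]
      exact ih (p + 1) (by omega) h
    · rw [if_neg h]
      exact ⟨hle, by omega⟩

-- a run of consecutive digits of decade `pwr`, stopping at `s` (either the digit 10 or the
-- first digit whose value exceeds m)
lemma seg_eq (m : Int) : ∀ (k : Nat) (num s : Int) (pwr : Nat), 1 ≤ num → num + k = s →
    s ≤ 10 → (s - 1) * 10 ^ pwr ≤ m → (s = 10 ∨ s * 10 ^ pwr > m) →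
    seg m num pwr = (List.range k).map (fun i : Nat => (num + (i : Int)) * 10 ^ pwr) := by
  intro k
  induction k with
  | zero =>
    intro num s pwr h1 hs hs10 hle hstop
    have : num = s := by omega
    subst this
    rcases hstop with h | h
    · subst h
      unfold seg
      rw [PySem.List.pyRange_one_eq_nil (by norm_num)]
      rfl
    · rw [seg_nil m num pwr h1 h]; rfl
  | succ k ih =>
    intro num s pwr h1 hs hs10 hle hstop
    have hp : (0:Int) < 10 ^ pwr := by positivity
    have hnum9 : num ≤ 9 := by omega
    have hnumle : num * 10 ^ pwr ≤ m := by
      have : num * 10 ^ pwr ≤ (s - 1) * 10 ^ pwr :=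
        mul_le_mul_of_nonneg_right (by omega) (le_of_lt hp)
      omega
    rw [seg_cons m num pwr h1 hnum9 hnumle, ih (num + 1) s pwr (by omega) (by omega) hs10 hle hstop]
    rw [List.range_succ_eq_map]
    simp only [List.map_cons, List.map_map, Nat.cast_zero, add_zero, Function.comp_def]
    congr 1
    apply List.map_congr_left
    intro i _
    push_cast
    ring

-- chain from power pwr equals the index-formula list, given pwr + k = p
lemma chain_gmap (m : Int) (p Lnat : Nat)
    (h10p : (10:Int) ^ p ≤ m) (h10p1 : m < 10 ^ (p + 1))
    (hL1 : 1 ≤ Lnat) (hL9 : Lnat ≤ 9)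
    (hLle : (Lnat : Int) * 10 ^ p ≤ m) (hLgt : m < ((Lnat : Int) + 1) * 10 ^ p) :
    ∀ (k f pwr : Nat), pwr + k = p → k < f →
    chain m f pwr =
      (List.range (9 * k + Lnat)).map
        (fun i => (((i % 9 : Nat) : Int) + 1) * 10 ^ (pwr + i / 9)) := by
  intro k
  induction k with
  | zero =>
    intro f pwr hpk hf
    obtain ⟨f', rfl⟩ : ∃ f', f = f' + 1 := ⟨f - 1, by omega⟩
    have hpwr : pwr = p := by omega
    subst hpwr
    show seg m 1 pwr ++ chain m f' (pwr + 1) = _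
    rw [chain_nil m f' (pwr + 1) (by omega)]
    rw [seg_eq m Lnat 1 ((Lnat : Int) + 1) pwr le_rfl (by omega) (by exact_mod_cast by omega)
      (by simpa using hLle) (Or.inr (by omega))]
    rw [List.append_nil]
    simp only [Nat.mul_zero, Nat.zero_add]
    apply List.map_congr_left
    intro i hi
    rw [List.mem_range] at hi
    have h1 : i % 9 = i := Nat.mod_eq_of_lt (by omega)
    have h2 : i / 9 = 0 := Nat.div_eq_of_lt (by omega)
    rw [h1, h2]
    push_cast
    ring
  | succ k ih =>
    intro f pwr hpk hf
    obtain ⟨f', rfl⟩ : ∃ f', f = f' + 1 := ⟨f - 1, by omega⟩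
    show seg m 1 pwr ++ chain m f' (pwr + 1) = _
    have hp : (0:Int) < 10 ^ pwr := by positivity
    have hpow : (10:Int) ^ (pwr + 1) ≤ 10 ^ p := by
      apply pow_le_pow_right₀ (by norm_num) (by omega)
    have h10 : (10:Int) ^ (pwr + 1) = 10 * 10 ^ pwr := by ring
    have hfull : (9 : Int) * 10 ^ pwr ≤ m := by omega
    rw [seg_eq m 9 1 10 pwr le_rfl (by norm_num) le_rfl (by norm_num; omega) (Or.inl rfl)]
    rw [ih f' (pwr + 1) (by omega) (by omega)]
    have hsplit : 9 * (k + 1) + Lnat = 9 + (9 * k + Lnat) := by omega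
    have hR : (List.range (9 * (k + 1) + Lnat)).map
        (fun i => (((i % 9 : Nat) : Int) + 1) * 10 ^ (pwr + i / 9)) =
        (List.range 9).map (fun i => (((i % 9 : Nat) : Int) + 1) * 10 ^ (pwr + i / 9)) ++
        (List.range (9 * k + Lnat)).map
          ((fun i => (((i % 9 : Nat) : Int) + 1) * 10 ^ (pwr + i / 9)) ∘ (fun j => 9 + j)) := by
      rw [hsplit, List.range_add, List.map_append, List.map_map]
    rw [hR]
    refine congrArg₂ (· ++ ·) ?_ ?_
    · apply List.map_congr_left
      intro i hi
      rw [List.mem_range] at hi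
      have h1 : i % 9 = i := Nat.mod_eq_of_lt hi
      have h2 : i / 9 = 0 := Nat.div_eq_of_lt hi
      rw [h1, h2]
      push_cast
      ring
    · apply List.map_congr_left
      intro j _
      simp only [Function.comp_def]
      have h1 : (9 + j) % 9 = j % 9 := by omega
      have h2 : (9 + j) / 9 = 1 + j / 9 := by omega
      rw [h1, h2]
      have he : pwr + 1 + j / 9 = pwr + (1 + j / 9) := by omega
      rw [he]

-- ===== VERDICT (by name: the statement is the Claim_ definition above) =====
theorem get_log_iters_spec : Claim_equal_get_log_iters := by
  intro m _
  unfold Spec_get_log_iters get_log_iters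
  by_cases hm : m < 1
  · have h0 : m.toNat = 0 := by omega
    rw [get_log_iters_alt, if_pos hm, h0]
    rfl
  · have hm1 : (1:Int) ≤ m := by omega
    obtain ⟨h1, h2⟩ := leadPow_spec m m.toNat 0
      (by simp only [pow_zero]; omega) (by simp only [pow_zero]; omega)
    set p := leadPow m m.toNat 0 with hpdef
    have hb : (0:Int) < 10 ^ p := by positivity
    have hfd : PySem.Int.floordiv m (10 ^ p) = m / 10 ^ p :=
      PySem.Int.floordiv_eq_ediv_of_pos hb
    have hdm := Int.ediv_add_emod m (10 ^ p)
    have hr0 := Int.emod_nonneg m (ne_of_gt hb)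
    have hrlt := Int.emod_lt_of_pos m hb
    set L := m / 10 ^ p with hLdef
    have hcomm : L * 10 ^ p = 10 ^ p * L := mul_comm _ _
    have hLle : L * 10 ^ p ≤ m := by omega
    have hLgt : m < (L + 1) * 10 ^ p := by
      have : (L + 1) * 10 ^ p = 10 ^ p * L + 10 ^ p := by ring
      omega
    have hL1 : 1 ≤ L := (Int.le_ediv_iff_mul_le hb).2 (by omega)
    have hL9 : L ≤ 9 := by
      by_contra hc
      have h10L : 10 * 10 ^ p ≤ L * 10 ^ p :=
        mul_le_mul_of_nonneg_right (by omega) (le_of_lt hb)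
      have h10 : (10:Int) ^ (p + 1) = 10 * 10 ^ p := by ring
      omega
    set Ln := L.toNat with hLndef
    have hLcast : (Ln : Int) = L := Int.toNat_of_nonneg (by omega)
    -- fuel bound: p ≤ m.toNat, because p < 10^p ≤ m
    have hpn : p < 10 ^ p := Nat.lt_pow_self (by norm_num)
    have hpc : ((10:Nat) ^ p : Int) = 10 ^ p := by push_cast; rfl
    have hpm : (p : Int) < m := by
      have := (Nat.cast_lt (α := Int)).2 hpn
      omega
    have hpf : p < m.toNat + 1 := by omega
    -- A's output is the chain, which is the index-formula list
    have hA : loopA m m.toNat 1 0 [] =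
        (List.range (9 * p + Ln)).map
          (fun i => (((i % 9 : Nat) : Int) + 1) * 10 ^ (0 + i / 9)) := by
      rw [loopA_eq m m.toNat 1 0 [] (by simp only [pow_zero, mul_one]; omega) le_rfl (by norm_num)]
      have : ([] : List Int) ++ seg m 1 0 ++ chain m m.toNat (0 + 1) =
          chain m (m.toNat + 1) 0 := by
        show _ = seg m 1 0 ++ chain m m.toNat (0 + 1)
        simp
      rw [this,
        chain_gmap m p Ln h1 h2 (by omega) (by omega) (by rw [hLcast]; exact hLle)
          (by rw [hLcast]; push_cast; omega) p (m.toNat + 1) 0 (by omega) hpf]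
    -- B's output is the same list
    have hcount : 9 * (p : Int) + PySem.Int.floordiv m (10 ^ p) = ((9 * p + Ln : Nat) : Int) := by
      rw [hfd]; push_cast; omega
    have hB : get_log_iters_alt m =
        (List.range (9 * p + Ln)).map
          (fun i => (((i % 9 : Nat) : Int) + 1) * 10 ^ (0 + i / 9)) := by
      have hstep : get_log_iters_alt m =
          (PySem.List.pyRange 0 (9 * (p : Int) + PySem.Int.floordiv m (10 ^ p)) 1).map
            (fun i => (PySem.Int.mod i 9 + 1) * 10 ^ (PySem.Int.floordiv i 9).toNat) := by
        rw [get_log_iters_alt, if_neg (by omega)]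
      rw [hstep, hcount, PySem.List.pyRange_one]
      have hsub : (((9 * p + Ln : Nat) : Int) - 0).toNat = 9 * p + Ln := by omega
      rw [hsub, List.map_map]
      apply List.map_congr_left
      intro k _
      simp only [Function.comp_def, zero_add]
      have hmod : PySem.Int.mod (k : Int) 9 = ((k % 9 : Nat) : Int) := by
        exact_mod_cast PySem.Int.mod_natCast k 9
      have hdiv : PySem.Int.floordiv (k : Int) 9 = ((k / 9 : Nat) : Int) := by
        exact_mod_cast PySem.Int.floordiv_natCast k 9
      rw [hmod, hdiv, Int.toNat_natCast]
    rw [hA, hB]
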